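-- pv_equiv track=rewrite | github.com/mahidhar93988/python-basics-nd-self | difference_sum_even_odd_index.py | difference_sum_even_odd_index
-- ===== SOURCE A (Python) =====
-- def difference_sum_even_odd_index(arr):
--     e = 0
--     o = 0
--
--     for i in range(len(arr)):
--         if i % 2 == 0:
--             e += arr[i]
--         else:
--             o += arr[i]
--
--     return e-o
-- ===== SOURCE B (Python) =====
-- def difference_sum_even_odd_index(arr):
--     n = len(arr)
--     total = 0
--     i = 0
--     while i + 1 < n:
--         total += arr[i] - arr[i + 1]
--         i += 2
--     if i < n:
--         total += arr[i]
--     return total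
-- ===== Notes on version B (the rewrite author's own statement) =====
-- stated objective: alternative
-- what changed: Replaces the per-index parity test with two accumulators by a stride-2 pairwise loop with a single accumulator that adds arr[i]-arr[i+1] per pair (plus a trailing lone element), removing the parity branch and the final subtraction.
import Mathlib
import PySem

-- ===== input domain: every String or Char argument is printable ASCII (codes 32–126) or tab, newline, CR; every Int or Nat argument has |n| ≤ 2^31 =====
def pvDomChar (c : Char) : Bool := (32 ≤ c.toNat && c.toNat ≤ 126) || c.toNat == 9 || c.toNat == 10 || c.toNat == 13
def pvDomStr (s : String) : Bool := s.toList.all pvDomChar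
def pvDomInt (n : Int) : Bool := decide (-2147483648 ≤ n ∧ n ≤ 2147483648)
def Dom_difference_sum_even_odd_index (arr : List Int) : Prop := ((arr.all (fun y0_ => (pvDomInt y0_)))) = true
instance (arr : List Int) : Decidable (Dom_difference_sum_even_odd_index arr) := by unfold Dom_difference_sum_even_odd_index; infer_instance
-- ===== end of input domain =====

-- B replaces the per-index parity test with two accumulators by a stride-2 pairwise
-- loop with a single accumulator (alternative decomposition, same O(n) cost).

-- ===== PORT A =====
def difference_sum_even_odd_index (arr : List Int) : Int :=
  let st := (PySem.List.pyRange 0 arr.length 1).foldl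
    (fun (s : Int × Int) i =>
      if PySem.Int.mod i 2 = 0 then (s.1 + PySem.List.pyGetD arr i 0, s.2)
      else (s.1, s.2 + PySem.List.pyGetD arr i 0)) (0, 0)
  st.1 - st.2

-- ===== PORT B =====
def pvAltGo (arr : List Int) (i : Nat) (total : Int) : Int :=
  if i + 1 < arr.length then
    pvAltGo arr (i + 2)
      (total + (PySem.List.pyGetD arr (i : Int) 0 - PySem.List.pyGetD arr ((i : Nat) + 1 : Nat) 0))
  else if i < arr.length then total + PySem.List.pyGetD arr (i : Int) 0
  else total
termination_by arr.length - i

def difference_sum_even_odd_index_alt (arr : List Int) : Int := pvAltGo arr 0 0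

-- ===== PRECONDITION & SPEC =====
def Spec_difference_sum_even_odd_index (arr : List Int) (out : Int) : Prop := out = difference_sum_even_odd_index_alt arr
instance (arr : List Int) (out : Int) : Decidable (Spec_difference_sum_even_odd_index arr out) := by unfold Spec_difference_sum_even_odd_index; infer_instance

-- ===== CLAIM (what is proved, stated in full; the proofs are below) =====
def Claim_equal_difference_sum_even_odd_index : Prop := ∀ (arr : List Int), Dom_difference_sum_even_odd_index arr → Spec_difference_sum_even_odd_index arr (difference_sum_even_odd_index arr)

-- ===== LEMMAS AND PROOFS =====

/-- (even-index sum, odd-index sum) of a list, by structural recursion. -/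
def pvEvod : List Int → Int × Int
  | [] => (0, 0)
  | x :: t => (x + (pvEvod t).2, (pvEvod t).1)

lemma pv_fold_evod (xs : List Int) : ∀ e o : Int,
    ((List.range xs.length).foldl
      (fun (s : Int × Int) k => if k % 2 = 0 then (s.1 + xs.getD k 0, s.2) else (s.1, s.2 + xs.getD k 0))
      (e, o) = (e + (pvEvod xs).1, o + (pvEvod xs).2))
    ∧
    ((List.range xs.length).foldl
      (fun (s : Int × Int) k => if k % 2 = 0 then (s.1, s.2 + xs.getD k 0) else (s.1 + xs.getD k 0, s.2))
      (e, o) = (e + (pvEvod xs).2, o + (pvEvod xs).1)) := by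
  induction xs with
  | nil => intro e o; simp [pvEvod]
  | cons x t ih =>
    intro e o
    have hr : List.range (x :: t).length = 0 :: (List.range t.length).map (· + 1) := by
      simp [List.range_succ_eq_map]
    constructor
    · rw [hr]
      simp only [List.foldl_cons, List.foldl_map]
      have hf : (fun (s : Int × Int) k =>
          if (k + 1) % 2 = 0 then (s.1 + (x :: t).getD (k + 1) 0, s.2)
          else (s.1, s.2 + (x :: t).getD (k + 1) 0))
          = (fun (s : Int × Int) k =>
          if k % 2 = 0 then (s.1, s.2 + t.getD k 0) else (s.1 + t.getD k 0, s.2)) := by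
        funext s k
        by_cases h : k % 2 = 0 <;> simp [h, Nat.add_mod, List.getD] <;> omega
      simp only [List.getD_cons_zero, if_true]
      rw [hf, (ih (e + x) o).2]
      simp [pvEvod]; ring
    · rw [hr]
      simp only [List.foldl_cons, List.foldl_map]
      have hf : (fun (s : Int × Int) k =>
          if (k + 1) % 2 = 0 then (s.1, s.2 + (x :: t).getD (k + 1) 0)
          else (s.1 + (x :: t).getD (k + 1) 0, s.2))
          = (fun (s : Int × Int) k =>
          if k % 2 = 0 then (s.1 + t.getD k 0, s.2) else (s.1, s.2 + t.getD k 0)) := by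
        funext s k
        by_cases h : k % 2 = 0 <;> simp [h, Nat.add_mod, List.getD] <;> omega
      simp only [List.getD_cons_zero, if_true]
      rw [hf, (ih e (o + x)).1]
      simp [pvEvod]; ring

lemma pv_A_eq (arr : List Int) :
    difference_sum_even_odd_index arr = (pvEvod arr).1 - (pvEvod arr).2 := by
  unfold difference_sum_even_odd_index
  rw [PySem.List.pyRange_one]
  simp only [List.foldl_map, zero_add, Int.sub_zero, Int.toNat_natCast]
  have hf : (fun (s : Int × Int) (k : Nat) =>
      if PySem.Int.mod (k : Int) 2 = 0 then (s.1 + PySem.List.pyGetD arr (k : Int) 0, s.2)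
      else (s.1, s.2 + PySem.List.pyGetD arr (k : Int) 0))
      = (fun (s : Int × Int) k =>
      if k % 2 = 0 then (s.1 + arr.getD k 0, s.2) else (s.1, s.2 + arr.getD k 0)) := by
    funext s k
    rw [PySem.Int.mod_eq_emod_of_pos (by omega : (0:Int) < 2)]
    simp only [PySem.List.pyGetD_natCast]
    by_cases h : k % 2 = 0
    · rw [if_pos (by omega), if_pos h]
    · rw [if_neg (by omega), if_neg h]
  rw [hf, (pv_fold_evod arr 0 0).1]
  simp

lemma pv_altGo_eq (arr : List Int) : ∀ (i : Nat) (total : Int),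
    pvAltGo arr i total = total + ((pvEvod (arr.drop i)).1 - (pvEvod (arr.drop i)).2) := by
  intro i total
  fun_induction pvAltGo arr i total with
  | case1 i total h ih =>
    have h1 : i < arr.length := by omega
    have h2 : i + 1 < arr.length := h
    rw [ih]
    simp only [PySem.List.pyGetD_natCast]
    rw [List.drop_eq_getElem_cons h1, List.drop_eq_getElem_cons h2,
      List.getD_eq_getElem _ _ h1, List.getD_eq_getElem _ _ h2]
    simp only [pvEvod]
    ring
  | case2 i total h1 h2 =>
    have hd : arr.drop i = [arr[i]] := by
      rw [List.drop_eq_getElem_cons h2]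
      have : arr.drop (i + 1) = [] := by
        apply List.drop_eq_nil_of_le; omega
      rw [this]
    rw [hd]
    simp only [pvEvod, PySem.List.pyGetD_natCast]
    rw [List.getD_eq_getElem _ _ h2]
    ring
  | case3 i total h1 h2 =>
    have hd : arr.drop i = [] := by apply List.drop_eq_nil_of_le; omega
    rw [hd]; simp [pvEvod]

lemma pv_B_eq (arr : List Int) :
    difference_sum_even_odd_index_alt arr = (pvEvod arr).1 - (pvEvod arr).2 := by
  unfold difference_sum_even_odd_index_alt
  rw [pv_altGo_eq arr 0 0]
  simp

-- ===== VERDICT (by name: the statement is the Claim_ definition above) =====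
theorem difference_sum_even_odd_index_spec : Claim_equal_difference_sum_even_odd_index := by
  intro arr _
  unfold Spec_difference_sum_even_odd_index
  rw [pv_A_eq, pv_B_eq]
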